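-- pv_equiv track=rewrite | github.com/overtime3/overtime | overtime/algorithms/sliding_window_temporal_vertex_cover.py | delta_A_union
-- ===== SOURCE A (Python) =====
-- import itertools
--
-- def delta_A_union(subset, delta):
--     """
--         A method which returns the all combinations of several sets
--
--         Parameter(s):
--         -------------
--             subset : List
--                 A list with several sets
--             delta : int
--                 Size of sliding window
--         Returns:
--         --------
--             All combinations of delta set: List
--                 A list contains all combinations of delta sets
--
--         Example(s):
--         -----------
--             subset = [[], ['a'], ['b'], ['a', 'b']]
--
--             combination = delta_A_union(subset, delta)
--
--         See also:
--         ---------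
--
--     """
--     u_set = []
--     b = [subset] * delta
--     c = list(itertools.product(*b))
--     for j in c:
--         s = {}
--         for i in range(1, delta + 1):
--             s.update({i: j[i - 1]})
--         u_set.append(s)
--     return u_set
-- ===== SOURCE B (Python) =====
-- def delta_A_union(subset, delta):
--     """Rank/unrank approach: every window assignment is one integer t in
--     range(len(subset)**delta); decode t's base-len(subset) digits (position 1
--     is the most significant, so the counter order matches itertools.product)
--     and map each digit to its element of subset. No product enumeration."""
--     m = len(subset)
--     n = delta if delta > 0 else 0
--     u_set = []
--     for t in range(m ** n):
--         digits = []
--         r = t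
--         for _ in range(n):
--             r, d = divmod(r, m)
--             digits.append(d)
--         s = {}
--         for i in range(1, n + 1):
--             s[i] = subset[digits[n - i]]
--         u_set.append(s)
--     return u_set
-- ===== Notes on version B (the rewrite author's own statement) =====
-- stated objective: alternative
-- what changed: Replaces itertools.product plus per-tuple relabelling by rank/unrank: a single counter t over range(len(subset)**delta) whose base-len(subset) digits are decoded (divmod loop) directly into the window dict, most significant digit first to match product order.
import Mathlib
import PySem

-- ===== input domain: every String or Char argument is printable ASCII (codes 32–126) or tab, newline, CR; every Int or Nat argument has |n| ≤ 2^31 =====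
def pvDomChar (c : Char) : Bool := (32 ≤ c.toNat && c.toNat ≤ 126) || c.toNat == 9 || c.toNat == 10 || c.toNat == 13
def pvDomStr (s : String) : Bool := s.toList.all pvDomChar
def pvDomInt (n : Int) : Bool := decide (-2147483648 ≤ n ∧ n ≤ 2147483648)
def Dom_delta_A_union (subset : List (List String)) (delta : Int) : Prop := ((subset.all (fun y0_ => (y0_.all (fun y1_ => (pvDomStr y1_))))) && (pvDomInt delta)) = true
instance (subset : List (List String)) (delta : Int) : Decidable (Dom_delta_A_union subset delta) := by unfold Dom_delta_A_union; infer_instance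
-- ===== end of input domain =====

-- B replaces itertools.product + per-tuple relabelling by rank/unrank: it counts
-- t through range(len(subset)**delta) and decodes t's base-len(subset) digits into
-- the window dict (alternative algorithm, same cost).


-- ===== PORT A =====
-- itertools.product(*b): first factor varies slowest
def pyProduct (ls : List (List (List String))) : List (List (List String)) :=
  match ls with
  | [] => [[]]
  | l :: rest => l.flatMap (fun x => (pyProduct rest).map (fun t => x :: t))

def delta_A_union (subset : List (List String)) (delta : Int) : List (List (Int × List String)) :=
  -- b = [subset] * delta  (negative delta gives the empty list, as in Python)
  let b := List.replicate delta.toNat subset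
  let c := pyProduct b
  c.foldl (fun u_set j =>
    -- s = {}; for i in range(1, delta+1): s.update({i: j[i-1]})
    -- j[i-1] is always in range here (j has length delta), so pyGetD's default is never used
    let s := (PySem.List.pyRange 1 (delta + 1) 1).foldl
      (fun s i => s.insert i (PySem.List.pyGetD j (i - 1) [])) (PySem.Dict.empty)
    u_set ++ [s.items]) []

-- ===== PORT B =====
-- for t in range(m ** n): decode the n base-m digits of t (divmod loop, least
-- significant first), then s[i] = subset[digits[n - i]] for i in 1..n.
-- divmod(r, m) is (floordiv r m, mod r m); the divisor m is nonzero whenever the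
-- inner loop runs (m = 0 and n > 0 makes range(m ** n) empty).  subset[digits[n-i]]
-- and digits[n-i] are always in range on executed paths (each digit < m, 0 ≤ n-i < n),
-- so pyGetD's defaults are never used.
def delta_A_union_alt (subset : List (List String)) (delta : Int) : List (List (Int × List String)) :=
  let m : Int := subset.length
  let n : Int := if delta > 0 then delta else 0
  (PySem.List.pyRange 0 (m ^ n.toNat) 1).foldl (fun u_set t =>
    let rd := (PySem.List.pyRange 0 n 1).foldl
      (fun (p : Int × List Int) _ =>
        (PySem.Int.floordiv p.1 m, p.2 ++ [PySem.Int.mod p.1 m])) (t, [])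
    let digits := rd.2
    let s := (PySem.List.pyRange 1 (n + 1) 1).foldl
      (fun (s : PySem.Dict Int (List String)) i =>
        s.insert i (PySem.List.pyGetD subset (PySem.List.pyGetD digits (n - i) 0) []))
      PySem.Dict.empty
    u_set ++ [s.items]) []

-- ===== PRECONDITION & SPEC =====
def Spec_delta_A_union (subset : List (List String)) (delta : Int) (out : List (List (Int × List String))) : Prop := out = delta_A_union_alt subset delta
instance (subset : List (List String)) (delta : Int) (out : List (List (Int × List String))) : Decidable (Spec_delta_A_union subset delta out) := by unfold Spec_delta_A_union; infer_instance

-- ===== CLAIM (what is proved, stated in full; the proofs are below) =====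
def Claim_equal_delta_A_union : Prop := ∀ (subset : List (List String)) (delta : Int), Dom_delta_A_union subset delta → Spec_delta_A_union subset delta (delta_A_union subset delta)

-- ===== LEMMAS AND PROOFS =====

-- the dict {1 ↦ v₀, 2 ↦ v₁, …} as an items list
def labelFrom (i : Int) : List (List String) → List (Int × List String)
  | [] => []
  | x :: xs => (i, x) :: labelFrom (i + 1) xs

theorem labelFrom_eq_map (j : List (List String)) : ∀ (i : Int),
    labelFrom i j = (List.range j.length).map (fun k : Nat => (i + (k : Int), j.getD k [])) := by
  induction j with
  | nil => intro i; simp [labelFrom]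
  | cons x xs ih =>
    intro i
    rw [labelFrom, ih (i + 1)]
    simp only [List.length_cons, List.range_succ_eq_map, List.map_cons, List.map_map]
    congr 1
    · simp
    · apply List.map_congr_left
      intro k _
      simp only [Function.comp_apply, List.getD_cons_succ]
      congr 1
      push_cast
      ring

theorem length_mem_pyProduct_replicate (n : Nat) (subset : List (List String)) :
    ∀ j ∈ pyProduct (List.replicate n subset), j.length = n := by
  induction n with
  | zero => intro j hj; simp [pyProduct] at hj; simp [hj]
  | succ m ih =>
    intro j hj
    simp only [List.replicate_succ, pyProduct, List.mem_flatMap, List.mem_map] at hj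
    obtain ⟨x, _, t, ht, rfl⟩ := hj
    simp [ih t ht]

-- the integer range 1..n as a mapped List.range
theorem pyRange_one_natCast (n : Nat) :
    PySem.List.pyRange 1 ((n : Int) + 1) 1 = (List.range n).map (fun k : Nat => ((k : Int) + 1)) := by
  induction n with
  | zero => decide
  | succ m ih =>
    rw [List.range_succ, List.map_append]
    rw [show (((m + 1 : Nat) : Int) + 1) = ((m : Int) + 1) + 1 by push_cast; ring,
        PySem.List.pyRange_one_succ_right (by omega)]
    rw [ih]
    simp

-- a dict built by inserting the fresh keys 1..n in order, as items
theorem dict_fold_items_gen (f : Int → List String) (n : Nat) :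
    (((List.range n).map (fun k : Nat => ((k : Int) + 1))).foldl
      (fun (s : PySem.Dict Int (List String)) i => s.insert i (f i))
      PySem.Dict.empty).items
    = (List.range n).map (fun k : Nat => (((k : Int) + 1), f ((k : Int) + 1))) := by
  induction n with
  | zero => simp [PySem.Dict.empty]
  | succ m ih =>
    rw [List.range_succ, List.map_append, List.foldl_append, List.map_append]
    simp only [List.map_cons, List.map_nil, List.foldl_cons, List.foldl_nil]
    set d := ((List.range m).map (fun k : Nat => ((k : Int) + 1))).foldl
      (fun (s : PySem.Dict Int (List String)) i => s.insert i (f i))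
      PySem.Dict.empty with hd
    have hnc : d.contains ((m : Int) + 1) = false := by
      rw [PySem.Dict.contains_eq_decide_mem_keys]
      simp only [decide_eq_false_iff_not]
      intro hmem
      have h2 : ((m : Int) + 1) ∈ d.items.map (·.1) := hmem
      rw [ih] at h2
      simp only [List.map_map, List.mem_map, List.mem_range] at h2
      obtain ⟨k, hk, hke⟩ := h2
      simp at hke
      omega
    rw [PySem.Dict.items_insert_of_not_contains _ _ hnc, ih]

theorem A_eq (subset : List (List String)) (delta : Int) :
    delta_A_union subset delta
      = (pyProduct (List.replicate delta.toNat subset)).map (fun j => labelFrom 1 j) := by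
  unfold delta_A_union
  rw [PySem.List.foldl_append_singleton_eq_map]
  apply List.map_congr_left
  intro j hj
  have hlen : j.length = delta.toNat := length_mem_pyProduct_replicate _ _ j hj
  by_cases h : 0 ≤ delta
  · rw [show delta = ((delta.toNat : Nat) : Int) by omega, pyRange_one_natCast,
        dict_fold_items_gen, labelFrom_eq_map, hlen]
    apply List.map_congr_left
    intro k hk
    simp only [List.mem_range] at hk
    simp only [Prod.mk.injEq]
    refine ⟨by omega, ?_⟩
    rw [show ((k : Int) + 1 - 1) = ((k : Nat) : Int) by ring, PySem.List.pyGetD_natCast]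
  · -- delta < 0: range(1, delta+1) is empty and j = []
    have h0 : delta.toNat = 0 := by omega
    rw [h0] at hlen
    have hj0 : j = [] := List.length_eq_zero_iff.mp hlen
    subst hj0
    unfold PySem.List.pyRange
    rw [if_neg (by omega), if_neg (by omega : ¬ (1:Int) < delta + 1)]
    simp [labelFrom, PySem.Dict.empty]

-- ---- B side: base-m digit decoding ----

-- the least-significant-first base-m digits produced by B's divmod loop
def lsf (m : Int) : Nat → Int → List Int
  | 0, _ => []
  | k+1, t => PySem.Int.mod t m :: lsf m k (PySem.Int.floordiv t m)

theorem lsf_length (m : Int) : ∀ (k : Nat) (t : Int), (lsf m k t).length = k := by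
  intro k
  induction k with
  | zero => intro t; rfl
  | succ j ih => intro t; simp [lsf, ih]

-- B's divmod loop over any k-element control list accumulates exactly lsf m k r
theorem digits_fold (m : Int) (l : List Int) : ∀ (r : Int) (acc : List Int),
    (l.foldl (fun (p : Int × List Int) _ =>
        (PySem.Int.floordiv p.1 m, p.2 ++ [PySem.Int.mod p.1 m])) (r, acc)).2
      = acc ++ lsf m l.length r := by
  induction l with
  | nil => intro r acc; simp [lsf]
  | cons x xs ih =>
    intro r acc
    simp only [List.foldl_cons, List.length_cons, ih]
    simp [lsf]

-- the element tuple B's digits denote (most significant digit = position 1)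
def jB (subset : List (List String)) (k : Nat) (t : Int) : List (List String) :=
  ((lsf subset.length k t).reverse).map (fun d => PySem.List.pyGetD subset d [])

theorem jB_length (subset : List (List String)) (k : Nat) (t : Int) :
    (jB subset k t).length = k := by
  simp [jB, lsf_length]

theorem range_mul_flatMap (a b : Nat) :
    List.range (a * b) = (List.range a).flatMap (fun q => (List.range b).map (fun d => q * b + d)) := by
  induction a with
  | zero => simp
  | succ c ih =>
    rw [Nat.succ_mul, List.range_add, List.range_succ, List.flatMap_append, ih]
    simp

theorem map_getD_range (xs : List (List String)) :
    (List.range xs.length).map (fun d : Nat => PySem.List.pyGetD xs (d : Int) []) = xs := by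
  apply List.ext_getElem (by simp)
  intro i h1 h2
  simp only [List.getElem_map, List.getElem_range]
  rw [PySem.List.pyGetD_natCast, List.getD_eq_getElem?_getD, List.getElem?_eq_getElem h2]
  rfl

theorem lsf_unrank (m : Int) (k : Nat) (q d : Int) (hm : 0 < m) (hd : 0 ≤ d) (hdm : d < m) :
    lsf m (k + 1) (q * m + d) = d :: lsf m k q := by
  have h1 : PySem.Int.mod (q * m + d) m = d := by
    rw [PySem.Int.mod_eq_emod_of_pos hm, show q * m + d = d + m * q by ring,
      Int.add_mul_emod_self_left, Int.emod_eq_of_lt hd hdm]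
  have h2 : PySem.Int.floordiv (q * m + d) m = q := by
    rw [PySem.Int.floordiv_eq_ediv_of_pos hm, show q * m + d = d + q * m by ring,
      Int.add_mul_ediv_right _ _ (by omega : m ≠ 0), Int.ediv_eq_zero_of_lt hd hdm]
    ring
  simp [lsf, h1, h2]

-- counting t through range(m^k) and decoding enumerates the product in order
theorem enum_jB (subset : List (List String)) : ∀ (k : Nat),
    (List.range (subset.length ^ k)).map (fun t : Nat => jB subset k (t : Int))
      = pyProduct (List.replicate k subset) := by
  intro k
  induction k with
  | zero => simp [pyProduct, jB, lsf]
  | succ c ih =>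
    have hsnoc : pyProduct (List.replicate (c + 1) subset)
        = (pyProduct (List.replicate c subset)).flatMap (fun t => subset.map (fun x => t ++ [x])) := by
      clear ih
      induction c with
      | zero =>
        simp only [List.replicate_succ, List.replicate_zero, pyProduct]
        simp [List.map_eq_flatMap]
      | succ e ihe =>
        conv_lhs => rw [List.replicate_succ, pyProduct]
        conv_rhs => rw [List.replicate_succ, pyProduct]
        rw [ihe]
        simp only [List.map_flatMap, List.flatMap_map, List.map_map, List.flatMap_assoc,
          Function.comp_def, List.cons_append]
    rw [hsnoc, ← ih, pow_succ, range_mul_flatMap, List.map_flatMap, List.flatMap_map]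
    apply List.flatMap_congr
    intro q hq
    by_cases hm : subset.length = 0
    · have hs0 : subset = [] := List.length_eq_zero_iff.mp hm
      subst hs0
      simp
    · have hmpos : (0 : Int) < subset.length := by exact_mod_cast Nat.pos_of_ne_zero hm
      rw [List.map_map]
      have hstep : ∀ d ∈ List.range subset.length,
          ((fun t : Nat => jB subset (c + 1) (t : Int)) ∘ fun d => q * subset.length + d) d
            = ((fun x => jB subset c (q : Int) ++ [x]) ∘
                (fun d : Nat => PySem.List.pyGetD subset (d : Int) [])) d := by
        intro d hd
        simp only [List.mem_range] at hd
        simp only [Function.comp_apply]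
        have hc : ((q * subset.length + d : Nat) : Int)
            = (q : Int) * (subset.length : Int) + (d : Int) := by push_cast; ring
        rw [hc]
        unfold jB
        rw [lsf_unrank _ c _ _ hmpos (by positivity) (by exact_mod_cast hd)]
        simp
      rw [List.map_congr_left hstep, ← List.map_map, map_getD_range]

-- B's per-t dict items are labelFrom 1 of the decoded tuple
theorem B_item_eq (subset : List (List String)) (k : Nat) (t : Int) :
    ((PySem.List.pyRange 1 ((k : Int) + 1) 1).foldl
      (fun (s : PySem.Dict Int (List String)) i =>
        s.insert i (PySem.List.pyGetD subset (PySem.List.pyGetD (lsf subset.length k t) ((k : Int) - i) 0) []))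
      PySem.Dict.empty).items = labelFrom 1 (jB subset k t) := by
  rw [pyRange_one_natCast, dict_fold_items_gen, labelFrom_eq_map, jB_length]
  apply List.map_congr_left
  intro κ hκ
  simp only [List.mem_range] at hκ
  simp only [Prod.mk.injEq]
  refine ⟨by omega, ?_⟩
  · have hidx : ((k : Int) - ((κ : Int) + 1)) = ((k - 1 - κ : Nat) : Int) := by omega
    rw [hidx, PySem.List.pyGetD_natCast]
    unfold jB
    have hrl : (lsf (subset.length : Int) k t).reverse.length = k := by simp [lsf_length]
    have hl : (lsf (subset.length : Int) k t).length = k := lsf_length _ _ _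
    conv_rhs => rw [List.getD_eq_getElem?_getD, List.getElem?_map,
      List.getElem?_eq_getElem (show κ < (lsf (subset.length : Int) k t).reverse.length by omega)]
    simp only [Option.map_some, Option.getD_some]
    rw [List.getElem_reverse]
    congr 1
    rw [List.getD_eq_getElem?_getD,
      List.getElem?_eq_getElem (show k - 1 - κ < (lsf (subset.length : Int) k t).length by omega)]
    simp only [Option.getD_some]
    congr 2
    omega

theorem delta_A_union_spec : Claim_equal_delta_A_union := by
  intro subset delta _
  unfold Spec_delta_A_union delta_A_union_alt
  dsimp only
  rw [A_eq]
  have hn : (if delta > 0 then delta else 0) = ((delta.toNat : Nat) : Int) := by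
    split_ifs with h <;> omega
  rw [hn]
  set k := delta.toNat with hk
  rw [show ((k : Int)).toNat = k by omega]
  rw [show ((subset.length : Int) ^ k) = ((subset.length ^ k : Nat) : Int) by push_cast; ring]
  rw [PySem.List.foldl_append_singleton_eq_map]
  rw [PySem.List.pyRange_zero_natCast, PySem.List.pyRange_zero_natCast]
  rw [← enum_jB subset k, List.map_map]
  simp only [List.nil_append, List.map_map]
  apply List.map_congr_left
  intro t _
  simp only [Function.comp_apply]
  rw [digits_fold]
  simp only [List.nil_append, List.length_map, List.length_range]
  exact (B_item_eq subset k (t : Int)).symm
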